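-- pv_equiv track=rewrite | github.com/MGoglio2212/StreamLit2 | App.py | decryptHard
-- ===== SOURCE A (Python) =====
-- def decryptHard(message):
--     newS=''
--     for i in range(len(message)):
--         if i%2==0:
--             newS=newS+chr(ord(message[i])-3)
--         else:
--             newS=newS+chr(ord(message[i])+2)
--
--     return newS
-- ===== SOURCE B (Python) =====
-- def decryptHard(message):
--     even = [chr(ord(c) - 3) for c in message[::2]]
--     odd = [chr(ord(c) + 2) for c in message[1::2]]
--     out = []
--     for e, o in zip(even, odd):
--         out.append(e)
--         out.append(o)
--     if len(even) > len(odd):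
--         out.append(even[-1])
--     return ''.join(out)
-- ===== Notes on version B (the rewrite author's own statement) =====
-- stated objective: alternative
-- what changed: Replaces A's single index loop with an i%2 branch per character by parity slicing: map chr(ord(c)-3) over message[::2] and chr(ord(c)+2) over message[1::2], then interleave the two transformed lists (appending the leftover even-index char for odd length) and join.
import Mathlib
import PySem

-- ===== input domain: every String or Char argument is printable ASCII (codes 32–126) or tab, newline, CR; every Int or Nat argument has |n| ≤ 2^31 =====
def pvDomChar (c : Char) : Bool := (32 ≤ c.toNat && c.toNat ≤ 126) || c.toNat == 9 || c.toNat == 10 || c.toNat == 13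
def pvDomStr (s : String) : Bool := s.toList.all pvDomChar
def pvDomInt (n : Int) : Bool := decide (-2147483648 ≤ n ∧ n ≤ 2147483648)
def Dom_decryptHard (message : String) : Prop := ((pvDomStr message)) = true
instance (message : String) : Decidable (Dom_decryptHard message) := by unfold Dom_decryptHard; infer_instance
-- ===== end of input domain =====

-- B replaces A's one-pass index loop by parity slicing (message[::2] / message[1::2]), mapping each
-- shift over its own slice, and interleaving the two results back; objective: alternative decomposition.

-- ===== PORT A =====
-- A: one loop over range(len(message)), appending one shifted char per index, branch on i % 2.
def decryptHard (message : String) : String :=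
  let cs := message.toList
  let newS : List Char :=
    (PySem.List.pyRange 0 (PySem.List.len cs) 1).foldl
      (fun newS i =>
        if PySem.Int.mod i 2 = 0 then
          newS ++ [Char.ofNat ((PySem.List.pyGetD cs i ' ').toNat - 3)]
        else
          newS ++ [Char.ofNat ((PySem.List.pyGetD cs i ' ').toNat + 2)])
      []
  String.ofList newS

-- ===== PORT B =====
-- the zip loop of Source B: append e then o for each pair, stopping at the shorter list
def pvInterleave : List Char → List Char → List Char
  | e :: es, o :: os => e :: o :: pvInterleave es os
  | _, _ => []

def decryptHard_alt (message : String) : String :=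
  let cs := message.toList
  let even := ((PySem.List.slice? cs none none 2).getD []).map
    (fun c => Char.ofNat (c.toNat - 3))
  let odd := ((PySem.List.slice? cs (some 1) none 2).getD []).map
    (fun c => Char.ofNat (c.toNat + 2))
  let core := pvInterleave even odd
  let out := if odd.length < even.length
    then core ++ [PySem.List.pyGetD even (-1) ' ']
    else core
  String.ofList out

-- ===== PRECONDITION & SPEC =====
def Spec_decryptHard (message : String) (out : String) : Prop := out = decryptHard_alt message
instance (message : String) (out : String) : Decidable (Spec_decryptHard message out) := by unfold Spec_decryptHard; infer_instance

-- ===== CLAIM (what is proved, stated in full; the proofs are below) =====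
def Claim_equal_decryptHard : Prop := ∀ (message : String), Dom_decryptHard message → Spec_decryptHard message (decryptHard message)

-- ===== LEMMAS AND PROOFS =====

-- the common value: alternate the two shifts along the string
def pvPar : Bool → List Char → List Char
  | _, [] => []
  | true, x :: r => Char.ofNat (x.toNat - 3) :: pvPar false r
  | false, x :: r => Char.ofNat (x.toNat + 2) :: pvPar true r

-- every second element, starting with the first (= xs[::2])
def pvEveryOther {α : Type} : List α → List α
  | [] => []
  | [x] => [x]
  | x :: _ :: r => x :: pvEveryOther r

theorem pvEveryOther_cons_tail {α : Type} (y : α) (r : List α) :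
    pvEveryOther (y :: r) = y :: pvEveryOther r.tail := by
  cases r <;> simp [pvEveryOther]

theorem pvStride2 {α : Type} (xs : List α) (c : Nat) (hc : c = (xs.length + 1) / 2) :
    List.filterMap (fun k => xs[2 * k]?) (List.range c) = pvEveryOther xs := by
  induction xs using pvEveryOther.induct generalizing c with
  | case1 => simp_all [pvEveryOther]
  | case2 x =>
      subst hc; simp [pvEveryOther, List.range_succ, List.filterMap]
  | case3 x y r ih =>
      have : c = (r.length + 1) / 2 + 1 := by subst hc; simp; omega
      subst this
      rw [List.range_succ_eq_map, List.filterMap_cons, List.filterMap_map]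
      simp only [Nat.mul_zero, List.getElem?_cons_zero]
      have h2 : ∀ k : Nat, (x :: y :: r)[2 * Nat.succ k]? = r[2 * k]? := by
        intro k
        have : 2 * Nat.succ k = 2 * k + 1 + 1 := by omega
        rw [this]; simp
      simp only [Function.comp_def, h2]
      rw [ih _ rfl]
      simp [pvEveryOther]

theorem pvSlice2 {α : Type} (xs : List α) :
    PySem.List.slice? xs none none 2 = some (pvEveryOther xs) := by
  simp only [PySem.List.slice?, PySem.List.sliceIndices]
  norm_num
  rw [show (if 0 < xs.length then (((xs.length : Int) + 2 - 1) / 2).toNat else 0) = (xs.length + 1) / 2 from by split <;> omega]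
  simp only [show ∀ k : Nat, ((2 : Int) * (k : Int)).toNat = 2 * k from fun k => by omega]
  exact pvStride2 xs _ rfl

theorem pvSlice2_one {α : Type} (xs : List α) :
    PySem.List.slice? xs (some 1) none 2 = some (pvEveryOther xs.tail) := by
  cases xs with
  | nil => simp [PySem.List.slice?, PySem.List.sliceIndices, pvEveryOther]
  | cons x r =>
      simp only [PySem.List.slice?, PySem.List.sliceIndices]
      norm_num
      rw [show (if 0 < r.length then (((r.length : Int) + 2 - 1) / 2).toNat else 0) = (r.length + 1) / 2 from by split <;> omega]
      simp only [show ∀ k : Nat, ((1 : Int) + 2 * (k : Int)).toNat = 2 * k + 1 from fun k => by omega]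
      simp only [List.getElem?_cons_succ]
      exact pvStride2 r _ rfl

-- A's loop, generalized over the already-consumed prefix
theorem pvFoldA (suf pre acc : List Char) :
    (PySem.List.pyRange (pre.length : Int) ((pre.length : Int) + (suf.length : Int)) 1).foldl
      (fun newS i =>
        if PySem.Int.mod i 2 = 0 then
          newS ++ [Char.ofNat ((PySem.List.pyGetD (pre ++ suf) i ' ').toNat - 3)]
        else
          newS ++ [Char.ofNat ((PySem.List.pyGetD (pre ++ suf) i ' ').toNat + 2)]) acc
    = acc ++ pvPar (decide (pre.length % 2 = 0)) suf := by
  induction suf generalizing pre acc with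
  | nil => simp [PySem.List.pyRange_one_eq_nil, pvPar]
  | cons x s ih =>
      rw [PySem.List.pyRange_one_cons (by simp)]
      simp only [List.foldl_cons]
      have hget : PySem.List.pyGetD (pre ++ x :: s) (pre.length : Int) ' ' = x := by
        simp [PySem.List.pyGetD_natCast, List.getD]
      have harr : (pre.length : Int) + ((x :: s).length : Int) = ((pre ++ [x]).length : Int) + (s.length : Int) := by
        simp; omega
      have hrange : (pre.length : Int) + 1 = ((pre ++ [x]).length : Int) := by simp
      rw [hget, harr, hrange]
      by_cases hp : pre.length % 2 = 0
      · rw [if_pos (by rw [PySem.Int.mod_eq_zero_iff_dvd]; omega)]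
        rw [show pre ++ x :: s = (pre ++ [x]) ++ s from by simp]
        rw [ih (pre ++ [x])]
        simp [pvPar, hp, show ¬ ((pre.length + 1) % 2 = 0) from by omega]
      · rw [if_neg (by rw [PySem.Int.mod_eq_zero_iff_dvd]; omega)]
        rw [show pre ++ x :: s = (pre ++ [x]) ++ s from by simp]
        rw [ih (pre ++ [x])]
        simp [pvPar, hp, show (pre.length + 1) % 2 = 0 from by omega]

theorem pvA_eq (message : String) :
    decryptHard message = String.ofList (pvPar true message.toList) := by
  have h := pvFoldA message.toList [] []
  simpa [decryptHard, PySem.List.len_eq] using congrArg String.ofList h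

theorem pvGetD_neg_one_cons (a : Char) (l : List Char) (h : l ≠ []) :
    PySem.List.pyGetD (a :: l) (-1) ' ' = PySem.List.pyGetD l (-1) ' ' := by
  cases l with
  | nil => exact absurd rfl h
  | cons b t => simp [PySem.List.pyGetD, PySem.List.pyGet?_neg_one]

theorem pvBmain (cs : List Char) :
    (if (((pvEveryOther cs.tail).map (fun c => Char.ofNat (c.toNat + 2))).length <
          ((pvEveryOther cs).map (fun c => Char.ofNat (c.toNat - 3))).length)
      then pvInterleave ((pvEveryOther cs).map (fun c => Char.ofNat (c.toNat - 3)))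
             ((pvEveryOther cs.tail).map (fun c => Char.ofNat (c.toNat + 2)))
           ++ [PySem.List.pyGetD ((pvEveryOther cs).map (fun c => Char.ofNat (c.toNat - 3))) (-1) ' ']
      else pvInterleave ((pvEveryOther cs).map (fun c => Char.ofNat (c.toNat - 3)))
             ((pvEveryOther cs.tail).map (fun c => Char.ofNat (c.toNat + 2))))
    = pvPar true cs := by
  induction cs using pvEveryOther.induct with
  | case1 => simp [pvEveryOther, pvInterleave, pvPar]
  | case2 x =>
      simp [pvEveryOther, pvInterleave, pvPar, PySem.List.pyGetD, PySem.List.pyGet?_neg_one]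
  | case3 x y r ih =>
      rw [show pvEveryOther (x :: y :: r) = x :: pvEveryOther r from rfl,
          show (x :: y :: r).tail = y :: r from rfl, pvEveryOther_cons_tail y r]
      simp only [List.map_cons, List.length_cons, pvInterleave]
      by_cases hlt : ((pvEveryOther r.tail).map (fun c => Char.ofNat (c.toNat + 2))).length <
          ((pvEveryOther r).map (fun c => Char.ofNat (c.toNat - 3))).length
      · have hne : ((pvEveryOther r).map (fun c => Char.ofNat (c.toNat - 3))) ≠ [] := by
          intro h; rw [h] at hlt; simp at hlt
        rw [if_pos hlt] at ih
        rw [if_pos (by omega), pvGetD_neg_one_cons _ _ hne]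
        simp only [List.cons_append, ih]
        simp [pvPar]
      · rw [if_neg hlt] at ih
        rw [if_neg (by omega)]
        simp [pvPar, ih]

theorem pvB_eq (message : String) :
    decryptHard_alt message = String.ofList (pvPar true message.toList) := by
  have h := pvBmain message.toList
  simp only [decryptHard_alt, pvSlice2, pvSlice2_one, Option.getD_some]
  rw [h]

-- ===== VERDICT (by name: the statement is the Claim_ definition above) =====
theorem decryptHard_spec : Claim_equal_decryptHard := by
  intro message _
  unfold Spec_decryptHard
  rw [pvA_eq, pvB_eq]
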